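-- pv_equiv track=rewrite | github.com/MiroVatov/Python-SoftUni | Python Fundamentals 2020 - 2021/04. Functions/10. Array Manipulator ver 2.py | max_even_index
-- ===== SOURCE A (Python) =====
-- def max_even_index(array, ar_index):
--     index_max_even_odd = []
--     max_even_odd_num = 0
--     index_pos = []
--     max_even = [ind for ind in array if ind % 2 == 0]
--     for a in max_even:
--         if a >= max(max_even):
--             index_max_even_odd.append(a)
--             max_even_odd_num = a
--     if len(index_max_even_odd) >= 1:
--         index_pos = len(array) - array[::-1].index(max_even_odd_num) - 1
--         return f"{index_pos}"
--
--     elif len(index_max_even_odd) == 0: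
--         return f"No matches"
-- ===== SOURCE B (Python) =====
-- def max_even_index(array, ar_index):
--     best = None
--     idx = -1
--     for i, v in enumerate(array):
--         if v % 2 == 0 and (best is None or v >= best):
--             best = v
--             idx = i
--     if best is None:
--         return "No matches"
--     return f"{idx}"
-- ===== Notes on version B (the rewrite author's own statement) =====
-- stated objective: faster
-- what changed: Replaced A's filter-then-rescan pipeline (recomputing max(max_even) inside the loop and finding the index via a reversed-list .index scan) by one enumerate pass that tracks the running maximum even value together with its last index.
import Mathlib
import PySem

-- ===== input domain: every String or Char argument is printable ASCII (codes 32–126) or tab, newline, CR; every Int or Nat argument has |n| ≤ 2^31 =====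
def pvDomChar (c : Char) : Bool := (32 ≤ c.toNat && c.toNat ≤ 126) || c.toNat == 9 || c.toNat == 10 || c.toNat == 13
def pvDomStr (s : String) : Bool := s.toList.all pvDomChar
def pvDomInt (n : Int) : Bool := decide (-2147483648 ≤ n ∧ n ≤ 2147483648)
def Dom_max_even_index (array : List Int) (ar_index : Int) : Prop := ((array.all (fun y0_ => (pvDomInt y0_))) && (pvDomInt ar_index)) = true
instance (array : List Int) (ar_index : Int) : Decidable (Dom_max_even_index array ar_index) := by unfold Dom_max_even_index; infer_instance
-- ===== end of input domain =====

-- B replaces A's filter + per-iteration max() + reversed .index scan by a single enumerate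
-- pass tracking the running maximum even value and its last index (objective: faster).
-- Both functions ignore ar_index, as the original does.

-- ===== PORT A =====
def max_even_index (array : List Int) (ar_index : Int) : String :=
  let max_even := array.filter (fun ind => PySem.Int.mod ind 2 == 0)
  let st := max_even.foldl (fun (s : List Int × Int) a =>
      match PySem.List.max? max_even (fun y => y) with
      | some m => if a ≥ m then (s.1 ++ [a], a) else s
      | none => s)   -- Python's max() would raise on an empty list; never reached inside the loop
    ([], 0)
  if st.1.length ≥ 1 then
    match PySem.List.slice? array none none (-1) with
    | some rev =>
      match PySem.List.index? rev st.2 with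
      | some i => PySem.Int.toStr ((array.length : Int) - (i : Int) - 1)
      | none => ""   -- Python's .index would raise ValueError; never reached (st.2 ∈ array)
    | none => ""     -- slice step -1 never fails
  else "No matches"

-- ===== PORT B =====
def max_even_index_alt (array : List Int) (ar_index : Int) : String :=
  let st := (PySem.List.enumerate array 0).foldl (fun (s : Option Int × Int) p =>
      if PySem.Int.mod p.2 2 == 0 && (match s.1 with | none => true | some b => decide (p.2 ≥ b))
      then (some p.2, p.1) else s)
    (none, -1)
  match st.1 with
  | some _ => PySem.Int.toStr st.2
  | none => "No matches"

-- ===== PRECONDITION & SPEC =====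
def Spec_max_even_index (array : List Int) (ar_index : Int) (out : String) : Prop := out = max_even_index_alt array ar_index
instance (array : List Int) (ar_index : Int) (out : String) : Decidable (Spec_max_even_index array ar_index out) := by unfold Spec_max_even_index; infer_instance

-- ===== CLAIM (what is proved, stated in full; the proofs are below) =====
def Claim_equal_max_even_index : Prop := ∀ (array : List Int) (ar_index : Int), Dom_max_even_index array ar_index → Spec_max_even_index array ar_index (max_even_index array ar_index)

-- ===== LEMMAS AND PROOFS =====

-- A's inner loop: folding over a list bounded by m and containing m yields num = m and a nonempty append list.
lemma pv_afold_spec (m : Int) (l : List Int) :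
    ∀ (s0 : List Int × Int), (∀ x ∈ l, x ≤ m) → m ∈ l →
    (l.foldl (fun s a => if a ≥ m then (s.1 ++ [a], a) else s) s0).2 = m ∧
    (l.foldl (fun s a => if a ≥ m then (s.1 ++ [a], a) else s) s0).1 ≠ [] := by
  induction l using List.reverseRecOn with
  | nil => intro s0 _ hm; cases hm
  | append_singleton l a ih =>
    intro s0 hle hm
    rw [List.foldl_append, List.foldl_cons, List.foldl_nil]
    by_cases hge : a ≥ m
    · have ha : a = m := le_antisymm (hle a (by simp)) hge
      simp [ha]
    · have hm' : m ∈ l := by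
        rcases List.mem_append.mp hm with h | h
        · exact h
        · simp only [List.mem_singleton] at h
          exact absurd (le_of_eq h) hge
      simp only [if_neg hge]
      exact ih s0 (fun x hx => hle x (List.mem_append_left _ hx)) hm'

-- B's loop does nothing when the list has no even element.
lemma pv_bfold_none (l : List Int) :
    ∀ (s : Int), l.filter (fun a => PySem.Int.mod a 2 == 0) = [] →
    ((PySem.List.enumerate l s).foldl (fun (s : Option Int × Int) p =>
        if PySem.Int.mod p.2 2 == 0 && (match s.1 with | none => true | some b => decide (p.2 ≥ b))
        then (some p.2, p.1) else s) (none, -1)) = ((none : Option Int), (-1 : Int)) := by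
  induction l with
  | nil => intro s _; simp [PySem.List.enumerate_nil]
  | cons x xs ih =>
    intro s hf
    simp only [List.filter_cons] at hf
    by_cases hx : (PySem.Int.mod x 2 == 0) = true
    · rw [if_pos hx] at hf
      exact absurd hf (List.cons_ne_nil _ _)
    · rw [if_neg hx] at hf
      have hx' : (PySem.Int.mod x 2 == 0) = false := by simpa using hx
      rw [PySem.List.enumerate_cons, List.foldl_cons]
      simp only [hx', Bool.false_and, Bool.false_eq_true, if_false]
      exact ih (s + 1) hf

-- Python max() of a snoc list (value form).
lemma pv_max_append_singleton (l : List Int) (v : Int) :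
    PySem.List.max? (l ++ [v]) (fun y => y) =
      some (match PySem.List.max? l (fun y => y) with | none => v | some m => max m v) := by
  cases l with
  | nil => simp [PySem.List.max?]
  | cons x t =>
    rw [List.cons_append, PySem.List.max?_id_cons, PySem.List.max?_id_cons, List.foldl_append]
    simp

-- B's loop result when the maximal even value is m: it carries m and the last index of m.
lemma pv_bfold_some (xs : List Int) :
    ∀ (m : Int), PySem.List.max? (xs.filter (fun a => PySem.Int.mod a 2 == 0)) (fun y => y) = some m →
    ∃ r : Nat, PySem.List.index? xs.reverse m = some r ∧
      ((PySem.List.enumerate xs 0).foldl (fun (s : Option Int × Int) p =>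
          if PySem.Int.mod p.2 2 == 0 && (match s.1 with | none => true | some b => decide (p.2 ≥ b))
          then (some p.2, p.1) else s) (none, -1)) = (some m, (xs.length : Int) - (r : Int) - 1) := by
  induction xs using List.reverseRecOn with
  | nil => intro m h; simp [PySem.List.max?] at h
  | append_singleton xs v ih =>
    intro m h
    have henum : PySem.List.enumerate (xs ++ [v]) 0
        = PySem.List.enumerate xs 0 ++ [((xs.length : Int), v)] := by
      rw [PySem.List.enumerate_append, PySem.List.enumerate_cons, PySem.List.enumerate_nil]
      norm_num
    rw [List.filter_append] at h
    by_cases hv : (PySem.Int.mod v 2 == 0) = true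
    · rw [show List.filter (fun a => PySem.Int.mod a 2 == 0) [v] = [v] by
            rw [List.filter_cons, if_pos hv, List.filter_nil],
          pv_max_append_singleton] at h
      cases hm0 : PySem.List.max? (xs.filter (fun a => PySem.Int.mod a 2 == 0)) (fun y => y) with
      | none =>
        rw [hm0] at h
        have hmv : m = v := by
          simp only [Option.some_inj] at h; exact h.symm
        have hfe := (PySem.List.max?_eq_none_iff _ _).mp hm0
        refine ⟨0, ?_, ?_⟩
        · rw [List.reverse_append, List.reverse_singleton, List.singleton_append, hmv]
          exact PySem.List.index?_cons_self _ _
        · rw [henum, List.foldl_append, pv_bfold_none xs 0 hfe, List.foldl_cons, List.foldl_nil]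
          have hc : (PySem.Int.mod v 2 == 0 &&
              (match (none : Option Int) with | none => true | some b => decide (v ≥ b))) = true := by
            rw [hv]; rfl
          rw [if_pos hc, hmv]
          simp only [Prod.mk.injEq, List.length_append, List.length_singleton]
          exact ⟨by trivial, by push_cast; ring⟩
      | some m0 =>
        rw [hm0] at h
        have hm : m = max m0 v := by simp only [Option.some_inj] at h; exact h.symm
        obtain ⟨r0, hidx0, hfold0⟩ := ih m0 hm0
        by_cases hge : v ≥ m0
        · have hmv : m = v := by rw [hm, max_eq_right hge]
          refine ⟨0, ?_, ?_⟩
          · rw [List.reverse_append, List.reverse_singleton, List.singleton_append, hmv]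
            exact PySem.List.index?_cons_self _ _
          · rw [henum, List.foldl_append, hfold0, List.foldl_cons, List.foldl_nil]
            have hc : (PySem.Int.mod v 2 == 0 &&
                (match (some m0 : Option Int) with | none => true | some b => decide (v ≥ b))) = true := by
              rw [hv]; simpa using hge
            rw [if_pos hc, hmv]
            simp only [Prod.mk.injEq, List.length_append, List.length_singleton]
            exact ⟨by trivial, by push_cast; ring⟩
        · have hlt : v < m0 := lt_of_not_ge hge
          have hmv : m = m0 := by rw [hm, max_eq_left (le_of_lt hlt)]
          refine ⟨r0 + 1, ?_, ?_⟩
          · rw [List.reverse_append, List.reverse_singleton, List.singleton_append, hmv,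
                PySem.List.index?_cons_of_ne _ (ne_of_lt hlt), hidx0]
            rfl
          · rw [henum, List.foldl_append, hfold0, List.foldl_cons, List.foldl_nil]
            have hc : (PySem.Int.mod v 2 == 0 &&
                (match (some m0 : Option Int) with | none => true | some b => decide (v ≥ b))) = false := by
              rw [hv]; simpa using hge
            simp only [hc, Bool.false_eq_true, if_false, hmv]
            simp only [Prod.mk.injEq, List.length_append, List.length_singleton]
            exact ⟨by trivial, by push_cast; ring⟩
    · rw [show List.filter (fun a => PySem.Int.mod a 2 == 0) [v] = [] by
            rw [List.filter_cons, if_neg hv, List.filter_nil],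
          List.append_nil] at h
      obtain ⟨r0, hidx0, hfold0⟩ := ih m h
      have hmem := PySem.List.max?_mem h
      have hme : (PySem.Int.mod m 2 == 0) = true := (List.mem_filter.mp hmem).2
      have hne : v ≠ m := fun he => hv (he ▸ hme)
      refine ⟨r0 + 1, ?_, ?_⟩
      · rw [List.reverse_append, List.reverse_singleton, List.singleton_append,
            PySem.List.index?_cons_of_ne _ hne, hidx0]
        rfl
      · rw [henum, List.foldl_append, hfold0, List.foldl_cons, List.foldl_nil]
        have hv' : (PySem.Int.mod v 2 == 0) = false := by simpa using hv
        simp only [hv', Bool.false_and, Bool.false_eq_true, if_false]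
        simp only [Prod.mk.injEq, List.length_append, List.length_singleton]
        exact ⟨by trivial, by push_cast; ring⟩

-- ===== VERDICT (by name: the statement is the Claim_ definition above) =====
theorem max_even_index_spec : Claim_equal_max_even_index := by
  intro array ar_index _
  show max_even_index array ar_index = max_even_index_alt array ar_index
  simp only [max_even_index, max_even_index_alt]
  cases h : PySem.List.max? (array.filter (fun a => PySem.Int.mod a 2 == 0)) (fun y => y) with
  | none =>
    have hfe := (PySem.List.max?_eq_none_iff _ _).mp h
    rw [hfe, pv_bfold_none array 0 hfe]
    simp
  | some m =>
    have hmem := PySem.List.max?_mem h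
    have hmax : ∀ y ∈ array.filter (fun a => PySem.Int.mod a 2 == 0), y ≤ m := by
      simpa using PySem.List.max?_isMax h
    obtain ⟨r, hidx, hfold⟩ := pv_bfold_some array m h
    obtain ⟨hnum, hne⟩ := pv_afold_spec m _ ([], 0) hmax hmem
    have hlen : (List.foldl (fun (s : List Int × Int) a => if a ≥ m then (s.1 ++ [a], a) else s)
        ([], 0) (array.filter (fun a => PySem.Int.mod a 2 == 0))).1.length ≥ 1 := by
      have := List.length_pos_iff.mpr hne
      omega
    rw [if_pos hlen]
    simp only [PySem.List.slice?_none_none_neg_one, hnum, hidx, hfold]
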